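-- pv_equiv track=rewrite | github.com/yactam/EA4 | TP3/tp3.py | triInsertionPartiel
-- ===== SOURCE A (Python) =====
-- def triInsertionPartiel(T, gap, debut) :
--     for i in range(debut, len(T)):
--             tmp = T[i]
--             j = i
--             while j >= gap and T[j - gap] > tmp:
--                 T[j] = T[j - gap]
--                 j -= gap
--             T[j] = tmp
--     return T
-- ===== SOURCE B (Python) =====
-- def triInsertionPartiel(T, gap, debut):
--     # Gather each gap-strided chain into a contiguous list, run a plain
--     # insertion sort on it (starting at the first chain position >= debut),
--     # and scatter it back.  Mutates T in place like the original and returns it.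
--     n = len(T)
--     for c in range(min(gap, n)):
--         idxs = range(c, n, gap)
--         chain = [T[p] for p in idxs]
--         start = max(0, -(-(debut - c) // gap))  # first k with c + k*gap >= debut
--         for k in range(start, len(chain)):
--             tmp = chain[k]
--             j = k
--             while j >= 1 and chain[j - 1] > tmp:
--                 chain[j] = chain[j - 1]
--                 j -= 1
--             chain[j] = tmp
--         for p, v in zip(idxs, chain):
--             T[p] = v
--     return T
-- ===== Notes on version B (the rewrite author's own statement) =====
-- stated objective: alternative
-- what changed: Instead of one flat pass shifting elements through the array with strided index arithmetic, B extracts each gap-strided chain into a contiguous list, runs a plain insertion sort on that list from the first chain position >= debut, and writes the chain back; gap-strided chains are independent, so the result is identical.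
import Mathlib
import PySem

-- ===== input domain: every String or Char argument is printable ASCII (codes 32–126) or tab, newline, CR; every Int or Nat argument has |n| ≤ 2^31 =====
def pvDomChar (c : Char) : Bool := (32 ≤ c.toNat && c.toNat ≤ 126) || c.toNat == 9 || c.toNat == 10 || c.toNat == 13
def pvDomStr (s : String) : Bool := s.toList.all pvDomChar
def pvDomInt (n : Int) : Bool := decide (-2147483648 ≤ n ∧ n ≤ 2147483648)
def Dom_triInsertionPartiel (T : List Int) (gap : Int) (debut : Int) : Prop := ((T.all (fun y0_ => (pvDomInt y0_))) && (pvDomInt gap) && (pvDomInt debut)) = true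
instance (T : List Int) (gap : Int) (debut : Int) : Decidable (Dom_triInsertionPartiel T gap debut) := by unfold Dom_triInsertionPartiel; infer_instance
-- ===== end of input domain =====

-- B reorganises A's flat strided insertion pass into gather / insertion-sort / scatter per
-- gap-chain (alternative structure, same cost); both mutate T in place in Python and end
-- with the same contents, the theorems below are about the returned value.

-- ===== PORT A =====
-- while j >= gap and T[j - gap] > tmp: T[j] = T[j - gap]; j -= gap
-- fuel-bounded; under Pre_ the fuel T.length + 1 is never exhausted.
def pvAWhile (gap tmp : Int) : Nat → List Int → Int → List Int × Int
  | 0, T, j => (T, j)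
  | fuel + 1, T, j =>
    if gap ≤ j then
      match PySem.List.pyGet? T (j - gap) with
      | none => (T, j)      -- Python raises IndexError here (excluded by Pre_)
      | some v =>
        if tmp < v then pvAWhile gap tmp fuel (PySem.List.pySetD T j v) (j - gap)
        else (T, j)
    else (T, j)

-- one iteration of A's outer for-loop
def pvAStep (gap : Int) (T : List Int) (i : Int) : List Int :=
  match PySem.List.pyGet? T i with
  | none => T               -- Python raises IndexError here (excluded by Pre_)
  | some tmp =>
    let r := pvAWhile gap tmp (T.length + 1) T i
    PySem.List.pySetD r.1 r.2 tmp

def triInsertionPartiel (T : List Int) (gap : Int) (debut : Int) : List Int :=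
  (PySem.List.pyRange debut (T.length : Int) 1).foldl (pvAStep gap) T

-- ===== PORT B =====
-- Source B inner while on the chain: while j >= 1 and chain[j-1] > tmp: chain[j] = chain[j-1]; j -= 1
-- structural on j (j ≥ 1 is the successor pattern); returns (chain, final j)
def pvBIns (tmp : Int) : Nat → List Int → List Int × Nat
  | 0, ch => (ch, 0)
  | j + 1, ch =>
    if tmp < ch.getD j 0 then pvBIns tmp j (ch.set (j + 1) (ch.getD j 0))
    else (ch, j + 1)

-- Source B body for one class c (n = len(T) computed once outside the loop)
def pvBClass (gap n debut : Int) (T : List Int) (c : Int) : List Int :=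
  let idxs := PySem.List.pyRange c n gap
  let chain := idxs.map (fun p => PySem.List.pyGetD T p 0)
  let start : Int := max 0 (-(PySem.Int.floordiv (-(debut - c)) gap))
  let chain' := (PySem.List.pyRange start (chain.length : Int) 1).foldl
      (fun ch k =>
        let tmp := PySem.List.pyGetD ch k 0
        let r := pvBIns tmp k.toNat ch
        r.1.set r.2 tmp) chain
  (idxs.zip chain').foldl (fun acc pv => PySem.List.pySetD acc pv.1 pv.2) T

def triInsertionPartiel_alt (T : List Int) (gap : Int) (debut : Int) : List Int :=
  let n : Int := T.length
  (PySem.List.pyRange 0 (min gap n) 1).foldl (pvBClass gap n debut) T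

-- ===== PRECONDITION & SPEC =====
-- Pre_ is exactly the set of inputs where A returns (everywhere else A raises IndexError):
-- debut must not reach below -len(T), and a negative gap is only harmless when the loop body is never entered.
def Pre_triInsertionPartiel (T : List Int) (gap : Int) (debut : Int) : Prop :=
  -(T.length : Int) ≤ debut ∧ (0 ≤ gap ∨ (T.length : Int) ≤ debut)
instance (T : List Int) (gap : Int) (debut : Int) : Decidable (Pre_triInsertionPartiel T gap debut) := by unfold Pre_triInsertionPartiel; infer_instance

def pvWitness_triInsertionPartiel : List Int × Int × Int := ([3, 1, 2, 0], 2, 1)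

def Spec_triInsertionPartiel (T : List Int) (gap : Int) (debut : Int) (out : List Int) : Prop := out = triInsertionPartiel_alt T gap debut
instance (T : List Int) (gap : Int) (debut : Int) (out : List Int) : Decidable (Spec_triInsertionPartiel T gap debut out) := by unfold Spec_triInsertionPartiel; infer_instance

-- ===== CLAIM (what is proved, stated in full; the proofs are below) =====
def Claim_equal_triInsertionPartiel : Prop := ∀ (T : List Int) (gap : Int) (debut : Int), Dom_triInsertionPartiel T gap debut → Pre_triInsertionPartiel T gap debut → Spec_triInsertionPartiel T gap debut (triInsertionPartiel T gap debut)


-- ===== LEMMAS AND PROOFS =====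


-- number of chain positions c, c+g, c+2g, ... strictly below n
def pvChainLen (n g c : Nat) : Nat := (n - c + g - 1) / g

-- the class-c chain of T, as a contiguous list
def pvGather (T : List Int) (g c : Nat) : List Int :=
  (List.range (pvChainLen T.length g c)).map (fun k => T.getD (c + k * g) 0)

-- write a chain back at positions c, c+g, ...
def pvScatter (g : Nat) : List Int → Nat → List Int → List Int
  | T, _, [] => T
  | T, c, v :: ch => pvScatter g (T.set c v) (c + g) ch

-- one insertion step on a contiguous chain (= the body of B's inner for-loop)
def pvChainStep (ch : List Int) (k : Nat) : List Int :=
  let tmp := ch.getD k 0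
  let r := pvBIns tmp k ch
  r.1.set r.2 tmp

theorem pvChainLen_lt_iff {g : Nat} (hg : 1 ≤ g) (n c k : Nat) :
    k < pvChainLen n g c ↔ c + k * g < n := by
  unfold pvChainLen
  rw [show (k < (n - c + g - 1) / g) = (k + 1 ≤ (n - c + g - 1) / g) from rfl,
      Nat.le_div_iff_mul_le hg]
  have : (k + 1) * g = k * g + g := by ring
  omega

theorem pvGather_length (T : List Int) (g c : Nat) :
    (pvGather T g c).length = pvChainLen T.length g c := by
  simp [pvGather]

theorem pvGather_getD {T : List Int} {g c k : Nat} (hk : k < pvChainLen T.length g c) :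
    (pvGather T g c).getD k 0 = T.getD (c + k * g) 0 := by
  unfold pvGather
  rw [List.getD_eq_getElem _ _ (by simpa using hk)]
  simp

theorem pvGetD_set_ne {T : List Int} {p m : Nat} (h : p ≠ m) (v d : Int) :
    (T.set m v).getD p d = T.getD p d := by
  rw [List.getD_eq_getElem?_getD, List.getD_eq_getElem?_getD,
      List.getElem?_set_ne (Ne.symm h)]

theorem pvGetD_set_self {T : List Int} {m : Nat} (h : m < T.length) (v d : Int) :
    (T.set m v).getD m d = v := by
  rw [List.getD_eq_getElem?_getD, List.getElem?_set_self h]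
  rfl

theorem pvClass_pos_ne {g c c' k k' : Nat} (hc : c < g) (hc' : c' < g)
    (hne : c ≠ c') : c + k * g ≠ c' + k' * g := by
  intro h
  have h1 : (c + k * g) % g = c := by
    rw [Nat.add_mul_mod_self_right]; exact Nat.mod_eq_of_lt hc
  have h2 : (c' + k' * g) % g = c' := by
    rw [Nat.add_mul_mod_self_right]; exact Nat.mod_eq_of_lt hc'
  rw [h] at h1; omega

theorem pvClass_inj {g c k k' : Nat} (hg : 1 ≤ g) (h : c + k * g = c + k' * g) : k = k' := by
  have : k * g = k' * g := by omega
  exact Nat.eq_of_mul_eq_mul_right hg this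

theorem pvGather_set {T : List Int} {g c k : Nat} (hg : 1 ≤ g)
    (hk : c + k * g < T.length) (v : Int) :
    pvGather (T.set (c + k * g) v) g c = (pvGather T g c).set k v := by
  apply List.ext_getElem
  · simp [pvGather, pvChainLen]
  · intro j h1 h2
    have hj : j < pvChainLen T.length g c := by
      simpa [pvGather, pvChainLen] using h2
    rw [← List.getD_eq_getElem _ 0 h1, ← List.getD_eq_getElem _ 0 h2]
    rw [pvGather_getD (by simpa [pvChainLen] using hj)]
    by_cases hjk : j = k
    · subst hjk
      rw [pvGetD_set_self (by simpa using hk) v 0,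
          List.getD_eq_getElem?_getD, List.getElem?_set_self (by simpa [pvGather_length] using hj)]
      rfl
    · rw [pvGetD_set_ne (fun h => hjk (pvClass_inj hg (by omega))) v 0,
          pvGetD_set_ne hjk v 0, pvGather_getD hj]

theorem pvScatter_length (g : Nat) (ch : List Int) : ∀ (T : List Int) (c : Nat),
    (pvScatter g T c ch).length = T.length := by
  induction ch with
  | nil => intro T c; rfl
  | cons v ch ih => intro T c; rw [pvScatter, ih]; simp

theorem pvScatter_getD_ne (g : Nat) (ch : List Int) : ∀ (T : List Int) (c p : Nat),
    (∀ k, k < ch.length → p ≠ c + k * g) →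
    (pvScatter g T c ch).getD p 0 = T.getD p 0 := by
  induction ch with
  | nil => intro T c p _; rfl
  | cons v ch ih =>
    intro T c p h
    rw [pvScatter, ih _ _ _ (fun k hk => by
      have := h (k + 1) (by simpa using hk)
      intro he; apply this; rw [he]; ring)]
    exact pvGetD_set_ne (by have := h 0 (by simp); simpa using this) v 0

theorem pvScatter_getD_hit (g : Nat) (hg : 1 ≤ g) (ch : List Int) :
    ∀ (T : List Int) (c k : Nat), k < ch.length → c + k * g < T.length →
    (pvScatter g T c ch).getD (c + k * g) 0 = ch.getD k 0 := by
  induction ch with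
  | nil => intro T c k hk; simp at hk
  | cons v ch ih =>
    intro T c k hk hlen
    match k with
    | 0 =>
      rw [pvScatter]
      rw [pvScatter_getD_ne g ch _ _ _ (fun k' hk' => by
        intro he
        have : c + 0 * g = (c + g) + k' * g := by simpa using he
        omega)]
      simpa using pvGetD_set_self (by simpa using hlen) v 0
    | k + 1 =>
      rw [pvScatter]
      have h1 : c + (k+1) * g = (c + g) + k * g := by ring
      rw [h1, ih _ _ _ (by simpa using hk) (by simp; omega)]
      rfl


theorem pvExt_getD {X Y : List Int} (hlen : X.length = Y.length)
    (h : ∀ p, p < X.length → X.getD p 0 = Y.getD p 0) : X = Y := by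
  apply List.ext_getElem hlen
  intro p h1 h2
  have := h p h1
  rwa [List.getD_eq_getElem _ _ h1, List.getD_eq_getElem _ _ h2] at this

theorem pvScatter_gather {g : Nat} (hg : 1 ≤ g) (T : List Int) (c : Nat) :
    pvScatter g T c (pvGather T g c) = T := by
  apply pvExt_getD (pvScatter_length g _ T c)
  intro p hp
  rw [pvScatter_length g _ T c] at hp
  by_cases h : ∃ k, k < pvChainLen T.length g c ∧ p = c + k * g
  · obtain ⟨k, hk, rfl⟩ := h
    rw [pvScatter_getD_hit g hg _ T c k (by simpa [pvGather_length] using hk) hp,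
        pvGather_getD hk]
  · exact pvScatter_getD_ne g _ T c p (fun k hk he =>
      h ⟨k, by simpa [pvGather_length] using hk, he⟩)

theorem pvGather_scatter {g : Nat} (hg : 1 ≤ g) {T ch : List Int} {c : Nat}
    (hlen : ch.length = pvChainLen T.length g c) :
    pvGather (pvScatter g T c ch) g c = ch := by
  apply pvExt_getD
  · rw [pvGather_length, pvScatter_length, hlen]
  · intro k hk
    rw [pvGather_length, pvScatter_length] at hk
    have hk' : c + k * g < T.length := (pvChainLen_lt_iff hg _ _ _).1 hk
    rw [pvGather_getD (by rwa [pvScatter_length]),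
        pvScatter_getD_hit g hg _ T c k (by omega) hk']

theorem pvGather_scatter_ne {g : Nat} {T ch : List Int} {c c' : Nat}
    (hc : c < g) (hc' : c' < g) (hne : c' ≠ c) :
    pvGather (pvScatter g T c ch) g c' = pvGather T g c' := by
  apply pvExt_getD
  · rw [pvGather_length, pvGather_length, pvScatter_length]
  · intro k hk
    rw [pvGather_length, pvScatter_length] at hk
    rw [pvGather_getD (by rwa [pvScatter_length]), pvGather_getD hk]
    exact pvScatter_getD_ne g _ T c _ (fun k' _ => pvClass_pos_ne hc' hc hne)

theorem pvScatter_set_absorb {g : Nat} (hg : 1 ≤ g) (ch : List Int) :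
    ∀ (T : List Int) (c k : Nat), k < ch.length → ∀ v,
    pvScatter g (T.set (c + k * g) v) c ch = pvScatter g T c ch := by
  induction ch with
  | nil => intro T c k hk; simp at hk
  | cons w ch ih =>
    intro T c k hk v
    match k with
    | 0 =>
      simp only [pvScatter]
      rw [show c + 0 * g = c by ring, List.set_set]
    | k + 1 =>
      simp only [pvScatter]
      rw [show c + (k+1) * g = (c + g) + k * g by ring,
          List.set_comm _ _ (by omega), ih _ _ _ (by simpa using hk)]

theorem pvSet_scatter_outside {g : Nat} (ch : List Int) :
    ∀ (T : List Int) (c p : Nat), (∀ k, k < ch.length → p ≠ c + k * g) → ∀ v,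
    (pvScatter g T c ch).set p v = pvScatter g (T.set p v) c ch := by
  induction ch with
  | nil => intro T c p _ v; rfl
  | cons w ch ih =>
    intro T c p h v
    simp only [pvScatter]
    rw [ih _ _ _ (fun k hk => by
        have := h (k + 1) (by simpa using hk)
        intro he; apply this; rw [he]; ring),
      List.set_comm _ _ (by have := h 0 (by simp); simp at this; exact fun he => this he.symm)]

theorem pvSet_scatter_inside {g : Nat} (hg : 1 ≤ g) (ch : List Int) :
    ∀ (T : List Int) (c j : Nat), j < ch.length → ∀ v,
    (pvScatter g T c ch).set (c + j * g) v = pvScatter g T c (ch.set j v) := by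
  induction ch with
  | nil => intro T c j hj; simp at hj
  | cons w ch ih =>
    intro T c j hj v
    match j with
    | 0 =>
      simp only [pvScatter, List.set]
      rw [show c + 0 * g = c by ring,
          pvSet_scatter_outside ch (T.set c w) (c + g) c (fun k _ he => by omega) v,
          List.set_set]
    | j + 1 =>
      simp only [pvScatter, List.set]
      rw [show c + (j+1) * g = (c + g) + j * g by ring,
          ih _ _ _ (by simpa using hj)]

theorem pvBIns_length (tmp : Int) : ∀ (m : Nat) (ch : List Int),
    (pvBIns tmp m ch).1.length = ch.length := by
  intro m
  induction m with
  | zero => intro ch; rfl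
  | succ j ih =>
    intro ch
    rw [pvBIns]
    split
    · rw [ih]; simp
    · rfl

theorem pvBIns_le (tmp : Int) : ∀ (m : Nat) (ch : List Int),
    (pvBIns tmp m ch).2 ≤ m := by
  intro m
  induction m with
  | zero => intro ch; exact Nat.le_refl 0
  | succ j ih =>
    intro ch
    rw [pvBIns]
    split
    · exact Nat.le_trans (ih _) (by omega)
    · exact Nat.le_refl _

theorem pvChainStep_length (ch : List Int) (k : Nat) :
    (pvChainStep ch k).length = ch.length := by
  unfold pvChainStep
  rw [List.length_set, pvBIns_length]


theorem pvAWhile_loc {g : Nat} (hg : 1 ≤ g) (tmp : Int) :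
    ∀ (m : Nat) (T : List Int) (fuel : Nat), m < fuel → ∀ (c : Nat), c < g →
    c + m * g < T.length →
    pvAWhile (g : Int) tmp fuel T ((c + m * g : Nat) : Int) =
      (pvScatter g T c (pvBIns tmp m (pvGather T g c)).1,
       ((c + (pvBIns tmp m (pvGather T g c)).2 * g : Nat) : Int)) := by
  intro m
  induction m with
  | zero =>
    intro T fuel hfuel c hc hlen
    match fuel, hfuel with
    | f + 1, _ =>
      rw [pvAWhile, if_neg (by
        intro h
        have : g ≤ c + 0 * g := by exact_mod_cast h
        omega)]
      rw [show pvBIns tmp 0 (pvGather T g c) = (pvGather T g c, 0) from rfl]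
      rw [pvScatter_gather hg]
  | succ m ih =>
    intro T fuel hfuel c hc hlen
    match fuel, hfuel with
    | f + 1, hfuel =>
      have hmul : (m + 1) * g = m * g + g := by ring
      have hlen' : c + m * g < T.length := by omega
      have hm1 : m + 1 < pvChainLen T.length g c := (pvChainLen_lt_iff hg _ _ _).2 hlen
      have hm : m < pvChainLen T.length g c := by omega
      rw [pvAWhile, if_pos (by exact_mod_cast (by omega : g ≤ c + (m + 1) * g))]
      rw [show ((c + (m + 1) * g : Nat) : Int) - (g : Int) = ((c + m * g : Nat) : Int) by
        push_cast; ring]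
      rw [PySem.List.pyGet?_natCast, List.getElem?_eq_getElem hlen']
      simp only []
      have hT : T[c + m * g] = (pvGather T g c).getD m 0 := by
        rw [pvGather_getD hm, List.getD_eq_getElem _ _ hlen']
      by_cases hlt : tmp < T[c + m * g]
      · rw [if_pos hlt, PySem.List.pySetD_natCast]
        have hlen1 : c + m * g < (T.set (c + (m + 1) * g) T[c + m * g]).length := by
          rw [List.length_set]; omega
        rw [ih (T.set (c + (m + 1) * g) T[c + m * g]) f (by omega) c hc hlen1]
        rw [pvGather_set hg hlen (T[c + m * g])]
        have hstep : pvBIns tmp (m + 1) (pvGather T g c) =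
            pvBIns tmp m ((pvGather T g c).set (m + 1) (T[c + m * g])) := by
          rw [pvBIns, if_pos (by rwa [← hT]), ← hT]
        rw [pvScatter_set_absorb hg _ _ _ (m + 1)
          (by rw [pvBIns_length, List.length_set, pvGather_length]; exact hm1) _]
        rw [hstep]
      · rw [if_neg hlt]
        have hstep : pvBIns tmp (m + 1) (pvGather T g c) = (pvGather T g c, m + 1) := by
          rw [pvBIns, if_neg (by rwa [← hT])]
        rw [hstep, pvScatter_gather hg]

theorem pvAStep_loc {g : Nat} (hg : 1 ≤ g) (T : List Int) (i : Nat) (hi : i < T.length) :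
    pvAStep (g : Int) T ((i : Nat) : Int) =
      pvScatter g T (i % g) (pvChainStep (pvGather T g (i % g)) (i / g)) := by
  have hcm : i % g + i / g * g = i := Nat.mod_add_div' i g
  have hc : i % g < g := Nat.mod_lt i (by omega)
  have hm : i / g < pvChainLen T.length g (i % g) :=
    (pvChainLen_lt_iff hg _ _ _).2 (by omega)
  unfold pvAStep
  rw [PySem.List.pyGet?_natCast, List.getElem?_eq_getElem hi]
  simp only []
  rw [show ((i : Nat) : Int) = ((i % g + i / g * g : Nat) : Int) by rw [hcm]]
  rw [pvAWhile_loc hg _ (i / g) T _ (by have := Nat.div_le_self i g; omega) _ hc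
    (by rw [hcm]; exact hi)]
  simp only []
  rw [PySem.List.pySetD_natCast]
  have hT : T[i] = (pvGather T g (i % g)).getD (i / g) 0 := by
    rw [pvGather_getD hm, hcm, List.getD_eq_getElem _ _ hi]
  rw [pvSet_scatter_inside hg _ _ _ _
    (by rw [pvBIns_length, pvGather_length]
        exact lt_of_le_of_lt (pvBIns_le _ _ _) hm)]
  rw [hT]
  rfl

theorem pvAStep_length (gap : Int) (T : List Int) (i : Int) :
    (pvAStep gap T i).length = T.length := by
  unfold pvAStep
  cases h : PySem.List.pyGet? T i with
  | none => rfl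
  | some tmp =>
    simp only []
    rw [PySem.List.length_pySetD]
    clear h
    generalize T.length + 1 = fuel
    induction fuel generalizing T i with
    | zero => rfl
    | succ f ih =>
      rw [pvAWhile]
      split
      · cases hg : PySem.List.pyGet? T (i - gap) with
        | none => rfl
        | some v =>
          simp only []
          split
          · rw [ih]; rw [PySem.List.length_pySetD]
          · rfl
      · rfl


theorem pvAFoldl_length (gap : Int) (L : List Int) : ∀ (T : List Int),
    (List.foldl (pvAStep gap) T L).length = T.length := by
  induction L with
  | nil => intro T; rfl
  | cons i L ih => intro T; rw [List.foldl_cons, ih, pvAStep_length]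

theorem pvChainLen_mono {a b g c : Nat} (h : a ≤ b) :
    pvChainLen a g c ≤ pvChainLen b g c :=
  Nat.div_le_div_right (by omega)

theorem pvAFold_loc {g : Nat} (hg : 1 ≤ g) (T : List Int) (d0 : Nat) (c : Nat) (hc : c < g) :
    ∀ (len : Nat), d0 + len ≤ T.length →
    pvGather (List.foldl (pvAStep (g : Int)) T (PySem.List.pyRange (d0 : Int) ((d0 + len : Nat) : Int) 1)) g c =
      List.foldl pvChainStep (pvGather T g c)
        (List.range' (pvChainLen d0 g c) (pvChainLen (d0 + len) g c - pvChainLen d0 g c)) := by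
  intro len
  induction len with
  | zero =>
    intro _
    rw [show ((d0 + 0 : Nat) : Int) = (d0 : Int) by push_cast; ring,
        PySem.List.pyRange_one_eq_nil (le_refl _)]
    rw [show d0 + 0 = d0 from rfl, Nat.sub_self]
    rfl
  | succ len ih =>
    intro hb
    have hb' : d0 + len ≤ T.length := by omega
    rw [show ((d0 + (len + 1) : Nat) : Int) = ((d0 + len : Nat) : Int) + 1 by push_cast; ring,
        PySem.List.pyRange_one_succ_right (by exact_mod_cast Nat.le_add_right d0 len),
        List.foldl_append]
    set Tb := List.foldl (pvAStep (g : Int)) T (PySem.List.pyRange (d0 : Int) ((d0 + len : Nat) : Int) 1) with hTb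
    have hTbLen : Tb.length = T.length := pvAFoldl_length _ _ _
    set b' := d0 + len with hb'def
    have hblt : b' < Tb.length := by omega
    rw [List.foldl_cons, List.foldl_nil, pvAStep_loc hg Tb b' hblt]
    have hcm : b' % g + b' / g * g = b' := Nat.mod_add_div' b' g
    have hmul : (b' / g + 1) * g = b' / g * g + g := by ring
    by_cases hcc : b' % g = c
    · rw [hcc]
      rw [pvGather_scatter hg (by rw [pvChainStep_length, pvGather_length, hTbLen])]
      -- arithmetic: pvChainLen b' g c = b' / g, pvChainLen (b'+1) g c = b' / g + 1
      have f1 : pvChainLen b' g c ≤ b' / g := by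
        by_contra h
        have := (pvChainLen_lt_iff hg b' c (b' / g)).1 (by omega)
        omega
      have f4 : b' / g ≤ pvChainLen b' g c := by
        cases hq : b' / g with
        | zero => omega
        | succ m' =>
          rw [hq] at hcm
          have h2 : (m' + 1) * g = m' * g + g := by ring
          have h3 : c + m' * g < b' := by omega
          have := (pvChainLen_lt_iff hg b' c m').2 h3
          omega
      have f2 : b' / g < pvChainLen (b' + 1) g c := by
        apply (pvChainLen_lt_iff hg (b' + 1) c (b' / g)).2
        omega
      have f3 : pvChainLen (b' + 1) g c ≤ b' / g + 1 := by
        by_contra h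
        have := (pvChainLen_lt_iff hg (b' + 1) c (b' / g + 1)).1 (by omega)
        omega
      have f5 : pvChainLen d0 g c ≤ pvChainLen b' g c := pvChainLen_mono (by omega)
      have e1 : pvChainLen (b' + 1) g c - pvChainLen d0 g c =
          (pvChainLen b' g c - pvChainLen d0 g c) + 1 := by omega
      rw [show d0 + (len + 1) = b' + 1 by omega, e1, List.range'_concat, List.foldl_append]
      have e2 : pvChainLen d0 g c + 1 * (pvChainLen b' g c - pvChainLen d0 g c) = b' / g := by
        omega
      rw [e2, List.foldl_cons, List.foldl_nil, ih hb']
    · rw [pvGather_scatter_ne (Nat.mod_lt b' (by omega)) hc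
        (fun h => hcc h.symm)]
      have u2 : pvChainLen b' g c ≤ pvChainLen (b' + 1) g c := pvChainLen_mono (by omega)
      have u1 : pvChainLen (b' + 1) g c ≤ pvChainLen b' g c := by
        by_contra h
        have h1 := (pvChainLen_lt_iff hg (b' + 1) c (pvChainLen b' g c)).1 (by omega)
        have h2 : ¬ (c + pvChainLen b' g c * g < b') := by
          intro h2
          have := (pvChainLen_lt_iff hg b' c (pvChainLen b' g c)).2 h2
          omega
        have heq : c + pvChainLen b' g c * g = b' := by omega
        apply hcc
        rw [← heq, Nat.add_mul_mod_self_right, Nat.mod_eq_of_lt hc]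
      rw [show d0 + (len + 1) = b' + 1 by omega,
          show pvChainLen (b' + 1) g c = pvChainLen b' g c by omega]
      exact ih hb'

theorem pvSetGet_self {T : List Int} {i : Int} {v : Int}
    (h : PySem.List.pyGet? T i = some v) : PySem.List.pySetD T i v = T := by
  unfold PySem.List.pyGet? at h
  unfold PySem.List.pySetD PySem.List.pySet?
  cases hk : PySem.List.pyIdx? T.length i with
  | none => rw [hk] at h; simp at h
  | some k =>
    rw [hk] at h
    simp only [Option.bind_some] at h
    obtain ⟨hlt, hv⟩ := List.getElem?_eq_some_iff.1 h
    simp only [Option.map_some, Option.getD_some]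
    rw [← hv]
    exact List.set_getElem_self hlt

theorem pvAWhile_succ (gap tmp : Int) (f : Nat) (T : List Int) (j : Int) :
    pvAWhile gap tmp (f + 1) T j =
      if gap ≤ j then
        match PySem.List.pyGet? T (j - gap) with
        | none => (T, j)
        | some v =>
          if tmp < v then pvAWhile gap tmp f (PySem.List.pySetD T j v) (j - gap) else (T, j)
      else (T, j) := rfl

theorem pvNegStep {gap : Int} {T : List Int} {i : Int} (hgap : 0 ≤ gap)
    (hineg : i < 0) : pvAStep gap T i = T := by
  unfold pvAStep
  cases h : PySem.List.pyGet? T i with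
  | none => rfl
  | some v =>
    show PySem.List.pySetD (pvAWhile gap v (T.length + 1) T i).1
      (pvAWhile gap v (T.length + 1) T i).2 v = T
    rw [pvAWhile_succ, if_neg (by omega)]
    exact pvSetGet_self h

theorem pvZeroStep {T : List Int} {i : Int} : pvAStep 0 T i = T := by
  unfold pvAStep
  cases h : PySem.List.pyGet? T i with
  | none => rfl
  | some v =>
    show PySem.List.pySetD (pvAWhile 0 v (T.length + 1) T i).1
      (pvAWhile 0 v (T.length + 1) T i).2 v = T
    rw [pvAWhile_succ]
    by_cases h0 : (0 : Int) ≤ i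
    · rw [if_pos h0, show i - 0 = i from by ring, h]
      simp only [if_neg (lt_irrefl v)]
      exact pvSetGet_self h
    · rw [if_neg h0]
      exact pvSetGet_self h

theorem pvFoldl_id {gap : Int} {T : List Int} {L : List Int}
    (h : ∀ i ∈ L, pvAStep gap T i = T) : List.foldl (pvAStep gap) T L = T := by
  induction L with
  | nil => rfl
  | cons a L ih =>
    rw [List.foldl_cons, h a (List.mem_cons_self)]
    exact ih (fun i hi => h i (List.mem_cons_of_mem a hi))


theorem pvStart_eq {g : Nat} (hg : 1 ≤ g) (debut : Int) (c : Nat) :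
    max 0 (-(PySem.Int.floordiv (-(debut - (c : Int))) (g : Int))) =
      ((pvChainLen (max debut 0).toNat g c : Nat) : Int) := by
  have hgpos : (0 : Int) < (g : Int) := by exact_mod_cast hg
  set q := -(PySem.Int.floordiv (-(debut - (c : Int))) (g : Int)) with hqdef
  have hbr := (PySem.Int.neg_floordiv_neg_eq_iff_of_pos (a := debut - (c : Int)) hgpos).1 hqdef.symm
  set d0 := (max debut 0).toNat with hd0
  have hd0c : ((d0 : Nat) : Int) = max debut 0 := Int.toNat_of_nonneg (le_max_right _ _)
  have key : ∀ k : Nat, (k < pvChainLen d0 g c) ↔ ((k : Int) < q) := by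
    intro k
    rw [pvChainLen_lt_iff hg]
    have hck : ((c + k * g : Nat) : Int) = (c : Int) + (k : Int) * (g : Int) := by
      push_cast; ring
    constructor
    · intro h
      by_contra hn
      have h1 : q ≤ (k : Int) := by omega
      have h2 : q * (g : Int) ≤ (k : Int) * (g : Int) :=
        mul_le_mul_of_nonneg_right h1 (le_of_lt hgpos)
      omega
    · intro h
      have h1 : (k : Int) ≤ q - 1 := by omega
      have h2 : (k : Int) * (g : Int) ≤ (q - 1) * (g : Int) :=
        mul_le_mul_of_nonneg_right h1 (le_of_lt hgpos)
      omega
  have h1 := key (pvChainLen d0 g c)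
  have h2 := key q.toNat
  omega

theorem pvFoldChain_length (ks : List Nat) : ∀ ch : List Int,
    (List.foldl pvChainStep ch ks).length = ch.length := by
  induction ks with
  | nil => intro ch; rfl
  | cons k ks ih => intro ch; rw [List.foldl_cons, ih, pvChainStep_length]

theorem pvZipScatter {g : Nat} : ∀ (ch : List Int) (cN : Nat) (T : List Int),
    (((List.range ch.length).map (fun k : Nat => ((cN : Int) + (g : Int) * (k : Int)))).zip ch).foldl
      (fun acc pv => PySem.List.pySetD acc pv.1 pv.2) T = pvScatter g T cN ch := by
  intro ch
  induction ch with
  | nil => intro cN T; rfl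
  | cons v ch ih =>
    intro cN T
    rw [show (v :: ch).length = ch.length + 1 from rfl, List.range_succ_eq_map,
        List.map_cons, List.map_map, List.zip_cons_cons, List.foldl_cons]
    have h0 : (cN : Int) + (g : Int) * ((0 : Nat) : Int) = ((cN : Nat) : Int) := by
      push_cast; ring
    rw [h0, PySem.List.pySetD_natCast]
    have hf : ((fun k : Nat => ((cN : Int) + (g : Int) * (k : Int))) ∘ Nat.succ) =
        (fun k : Nat => (((cN + g : Nat) : Int) + (g : Int) * (k : Int))) := by
      funext k
      simp only [Function.comp]
      push_cast
      ring
    rw [hf, ih (cN + g) (T.set cN v)]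
    rfl

theorem pvBClass_loc {g : Nat} (hg : 1 ≤ g) (debut : Int) (T : List Int) (c : Nat)
    (hcn : c < T.length) :
    pvBClass (g : Int) (T.length : Int) debut T (c : Int) =
      pvScatter g T c
        (List.foldl pvChainStep (pvGather T g c)
          (List.range' (pvChainLen (max debut 0).toNat g c)
            (pvChainLen T.length g c - pvChainLen (max debut 0).toNat g c))) := by
  have hgpos : (0 : Int) < (g : Int) := by exact_mod_cast hg
  simp only [pvBClass]
  rw [PySem.List.pyRange_of_pos _ _ hgpos, if_pos (by exact_mod_cast hcn)]
  have hL : (((T.length : Int) - (c : Int) + (g : Int) - 1) / (g : Int)).toNat =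
      pvChainLen T.length g c := by
    rw [show ((T.length : Int) - (c : Int) + (g : Int) - 1) =
        ((T.length - c + g - 1 : Nat) : Int) by omega,
      ← Int.natCast_ediv, Int.toNat_natCast]
    rfl
  rw [hL, List.map_map]
  have hchain : (List.range (pvChainLen T.length g c)).map
      ((fun p => PySem.List.pyGetD T p 0) ∘ (fun k : Nat => (c : Int) + (g : Int) * (k : Int))) =
      pvGather T g c := by
    unfold pvGather
    apply List.map_congr_left
    intro k hk
    have : (c : Int) + (g : Int) * (k : Int) = ((c + k * g : Nat) : Int) := by push_cast; ring
    simp only [Function.comp, this, PySem.List.pyGetD_natCast]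
  rw [hchain, pvGather_length, pvStart_eq hg debut c]
  set s := pvChainLen (max debut 0).toNat g c with hs
  set cl := pvChainLen T.length g c with hcl
  have hfold : (PySem.List.pyRange (s : Int) (cl : Int) 1).foldl
      (fun ch k =>
        (pvBIns (PySem.List.pyGetD ch k 0) k.toNat ch).1.set
          (pvBIns (PySem.List.pyGetD ch k 0) k.toNat ch).2 (PySem.List.pyGetD ch k 0))
      (pvGather T g c) =
      List.foldl pvChainStep (pvGather T g c) (List.range' s (cl - s)) := by
    rw [PySem.List.pyRange_one, show ((cl : Int) - (s : Int)).toNat = cl - s by omega,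
        List.foldl_map, List.range'_eq_map_range, List.foldl_map]
    apply PySem.List.foldl_congr_mem
    intro ch k _
    have hidx : (s : Int) + (k : Int) = ((s + k : Nat) : Int) := by push_cast; ring
    simp only [hidx, PySem.List.pyGetD_natCast, Int.toNat_natCast]
    rfl
  rw [hfold]
  set ch' := List.foldl pvChainStep (pvGather T g c) (List.range' s (cl - s)) with hch'
  have hlen' : cl = ch'.length := by rw [hch', pvFoldChain_length, pvGather_length]
  rw [hlen', pvZipScatter]


theorem pvBFold_loc {g : Nat} (hg : 1 ≤ g) (debut : Int) (T : List Int) :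
    ∀ (t : Nat), t ≤ min g T.length →
    (List.foldl (pvBClass (g : Int) (T.length : Int) debut) T
        ((List.range t).map (fun c : Nat => (c : Int)))).length = T.length ∧
    ∀ c : Nat, c < g →
      pvGather (List.foldl (pvBClass (g : Int) (T.length : Int) debut) T
          ((List.range t).map (fun c : Nat => (c : Int)))) g c =
        if c < t then
          List.foldl pvChainStep (pvGather T g c)
            (List.range' (pvChainLen (max debut 0).toNat g c)
              (pvChainLen T.length g c - pvChainLen (max debut 0).toNat g c))
        else pvGather T g c := by
  intro t
  induction t with
  | zero =>
    intro _
    refine ⟨rfl, fun c hc => ?_⟩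
    rw [if_neg (by omega)]
    rfl
  | succ t ih =>
    intro ht
    obtain ⟨ihlen, ihg⟩ := ih (by omega)
    rw [List.range_succ, List.map_append, List.foldl_append]
    set Rt := List.foldl (pvBClass (g : Int) (T.length : Int) debut) T
        ((List.range t).map (fun c : Nat => (c : Int))) with hRt
    simp only [List.map_cons, List.map_nil, List.foldl_cons, List.foldl_nil]
    have htg : t < g := by omega
    have htn : t < T.length := by omega
    have hcast : ((T.length : Nat) : Int) = ((Rt.length : Nat) : Int) := by rw [ihlen]
    rw [hcast, pvBClass_loc hg debut Rt t (by omega)]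
    rw [ihg t htg, if_neg (by omega), ihlen]
    constructor
    · rw [pvScatter_length, ihlen]
    · intro c hc
      by_cases hct : c = t
      · subst hct
        rw [pvGather_scatter hg (by rw [pvFoldChain_length, pvGather_length, ihlen]),
            if_pos (by omega)]
      · rw [pvGather_scatter_ne htg hc hct, ihg c hc]
        by_cases hclt : c < t
        · rw [if_pos hclt, if_pos (by omega)]
        · rw [if_neg hclt, if_neg (by omega)]

theorem pvGetD_via_gather {g : Nat} (hg : 1 ≤ g) (X : List Int) (p : Nat) (hp : p < X.length) :
    X.getD p 0 = (pvGather X g (p % g)).getD (p / g) 0 := by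
  have hm : p / g < pvChainLen X.length g (p % g) := by
    apply (pvChainLen_lt_iff hg _ _ _).2
    rw [Nat.mod_add_div']
    exact hp
  rw [pvGather_getD hm, Nat.mod_add_div']

theorem pvMain {T : List Int} {debut : Int} {g : Nat} (hg : 1 ≤ g) :
    triInsertionPartiel T (g : Int) debut = triInsertionPartiel_alt T (g : Int) debut := by
  set n := T.length with hn
  set d0 := (max debut 0).toNat with hd0
  have hd0c : ((d0 : Nat) : Int) = max debut 0 := Int.toNat_of_nonneg (le_max_right _ _)
  have hAlen : (triInsertionPartiel T (g : Int) debut).length = n := by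
    unfold triInsertionPartiel
    rw [pvAFoldl_length]
  have hAgather : ∀ c : Nat, c < g →
      pvGather (triInsertionPartiel T (g : Int) debut) g c =
        List.foldl pvChainStep (pvGather T g c)
          (List.range' (pvChainLen d0 g c) (pvChainLen n g c - pvChainLen d0 g c)) := by
    intro c hc
    unfold triInsertionPartiel
    by_cases hnd : (n : Int) ≤ debut
    · rw [PySem.List.pyRange_one_eq_nil hnd]
      have h1 : pvChainLen n g c ≤ pvChainLen d0 g c := pvChainLen_mono (by omega)
      rw [show pvChainLen n g c - pvChainLen d0 g c = 0 by omega]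
      rfl
    · have hdn : d0 ≤ n := by omega
      rw [PySem.List.pyRange_one_append debut (d0 : Int) (n : Int) (by omega) (by omega),
          List.foldl_append]
      rw [pvFoldl_id (gap := (g : Int)) (T := T) (L := PySem.List.pyRange debut (d0 : Int) 1)
        (fun i hi => by
          rw [PySem.List.mem_pyRange_one] at hi
          exact pvNegStep (by positivity) (by omega))]
      have hfl := pvAFold_loc hg T d0 c hc (n - d0) (by omega)
      rw [show d0 + (n - d0) = n by omega] at hfl
      exact hfl
  have hB : triInsertionPartiel_alt T (g : Int) debut =
      List.foldl (pvBClass (g : Int) (n : Int) debut) T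
        ((List.range (min g n)).map (fun c : Nat => (c : Int))) := by
    show List.foldl (pvBClass (g : Int) ((T.length : Nat) : Int) debut) T
        (PySem.List.pyRange 0 (min ((g : Nat) : Int) ((T.length : Nat) : Int)) 1) = _
    rw [show min ((g : Nat) : Int) ((T.length : Nat) : Int) = ((min g T.length : Nat) : Int) by
      rw [Nat.cast_min], PySem.List.pyRange_zero_natCast]
  obtain ⟨hBlen, hBg⟩ := pvBFold_loc hg debut T (min g n) (le_refl _)
  rw [hB]
  apply pvExt_getD
  · rw [hAlen, hBlen]
  · intro p hp
    rw [hAlen] at hp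
    have hcg : p % g < g := Nat.mod_lt p (by omega)
    have hcM : p % g < min g n := by
      have : p % g ≤ p := Nat.mod_le p g
      omega
    rw [pvGetD_via_gather hg _ p (by rwa [hAlen]),
        pvGetD_via_gather hg (List.foldl (pvBClass (g : Int) (n : Int) debut) T
          ((List.range (min g n)).map (fun c : Nat => (c : Int)))) p (by rwa [hBlen]),
        hAgather _ hcg, hBg _ hcg, if_pos hcM]

-- ===== VERDICT (by name: the statement is the Claim_ definition above) =====
theorem triInsertionPartiel_spec : Claim_equal_triInsertionPartiel := by
  intro T gap debut _ hpre
  unfold Spec_triInsertionPartiel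
  unfold Pre_triInsertionPartiel at hpre
  obtain ⟨hlo, hcase⟩ := hpre
  rcases lt_trichotomy gap 0 with hneg | hzero | hpos
  · have hnd : (T.length : Int) ≤ debut := hcase.resolve_left (by omega)
    unfold triInsertionPartiel
    rw [PySem.List.pyRange_one_eq_nil hnd]
    show T = List.foldl (pvBClass gap ((T.length : Nat) : Int) debut) T
      (PySem.List.pyRange 0 (min gap ((T.length : Nat) : Int)) 1)
    rw [min_eq_left (by omega : gap ≤ ((T.length : Nat) : Int)),
        PySem.List.pyRange_one_eq_nil (by omega : gap ≤ 0)]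
    rfl
  · subst hzero
    unfold triInsertionPartiel
    rw [pvFoldl_id (fun i _ => pvZeroStep)]
    show T = List.foldl (pvBClass 0 ((T.length : Nat) : Int) debut) T
      (PySem.List.pyRange 0 (min 0 ((T.length : Nat) : Int)) 1)
    rw [min_eq_left (by exact_mod_cast Nat.zero_le T.length),
        PySem.List.pyRange_one_eq_nil (le_refl 0)]
    rfl
  · obtain ⟨g, rfl⟩ : ∃ g : Nat, gap = ((g : Nat) : Int) := ⟨gap.toNat, by omega⟩
    exact pvMain (by exact_mod_cast hpos)
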